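-- pv_equiv track=rewrite | github.com/Haiwei1027/aoc-2023 | day13/solver.py | load_grid
-- ===== SOURCE A (Python) =====
-- def load_grid(input_data):
--     grid = []
--     if len(input_data) == 0:
--         return None
--     while input_data[0] != "":
--         grid.append(input_data.pop(0))
--         if len(input_data) == 0:
--             return grid
--         pass
--     if input_data[0] == "":
--         input_data.pop(0)
--     return grid
-- ===== SOURCE B (Python) =====
-- def load_grid(input_data):
--     if not input_data:
--         return None
--     idx = input_data.index("") if "" in input_data else len(input_data)
--     grid = input_data[:idx]
--     if idx < len(input_data):
--         del input_data[:idx + 1]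
--     else:
--         del input_data[:idx]
--     return grid
-- ===== Notes on version B (the rewrite author's own statement) =====
-- stated objective: faster
-- what changed: B finds the first blank line's index once and slices/bulk-deletes, instead of A's while-loop popping element 0 one at a time, which is quadratic in CPython due to repeated pop(0).
import Mathlib
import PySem

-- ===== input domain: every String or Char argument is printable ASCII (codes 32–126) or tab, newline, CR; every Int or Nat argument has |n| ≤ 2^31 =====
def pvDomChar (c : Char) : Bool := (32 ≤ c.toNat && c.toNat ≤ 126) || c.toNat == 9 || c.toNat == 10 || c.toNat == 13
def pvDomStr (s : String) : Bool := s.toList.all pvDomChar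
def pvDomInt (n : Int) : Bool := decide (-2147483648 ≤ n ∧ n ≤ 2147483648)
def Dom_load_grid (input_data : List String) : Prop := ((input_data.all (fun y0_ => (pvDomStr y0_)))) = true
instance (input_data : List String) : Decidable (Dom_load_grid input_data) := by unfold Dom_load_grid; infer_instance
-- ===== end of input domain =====

-- B scans once for the first blank line's index and slices, instead of A's pop(0) loop;
-- equivalence proved is about the RETURN value (both Pythons also mutate input_data identically).

-- ===== PORT A =====
-- A's while loop: pop the head into grid until a blank line or exhaustion.
def load_grid_loop (grid : List String) : List String → List String
  | [] => grid
  | h :: t => if h = "" then grid else load_grid_loop (grid ++ [h]) t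

def load_grid (input_data : List String) : Option (List String) :=
  if input_data.length = 0 then none
  else some (load_grid_loop [] input_data)

-- ===== PORT B =====
def load_grid_alt (input_data : List String) : Option (List String) :=
  if input_data = [] then none
  else
    let idx : Nat :=
      if "" ∈ input_data then (PySem.List.index? input_data "").getD 0
      else input_data.length
    some (input_data.take idx)

-- ===== PRECONDITION & SPEC =====
def Spec_load_grid (input_data : List String) (out : Option (List String)) : Prop := out = load_grid_alt input_data
instance (input_data : List String) (out : Option (List String)) : Decidable (Spec_load_grid input_data out) := by unfold Spec_load_grid; infer_instance

-- ===== CLAIM (what is proved, stated in full; the proofs are below) =====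
def Claim_equal_load_grid : Prop := ∀ (input_data : List String), Dom_load_grid input_data → Spec_load_grid input_data (load_grid input_data)

-- ===== LEMMAS AND PROOFS =====
def pvIdx (xs : List String) : Nat :=
  if "" ∈ xs then (PySem.List.index? xs "").getD 0 else xs.length

theorem pvIdx_cons_ne (h : String) (t : List String) (hne : h ≠ "") :
    pvIdx (h :: t) = pvIdx t + 1 := by
  unfold pvIdx
  by_cases hm : "" ∈ t
  · have hm' : "" ∈ h :: t := List.mem_cons_of_mem _ hm
    rw [if_pos hm', if_pos hm, PySem.List.index?_cons_of_ne t hne]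
    obtain ⟨k, hk⟩ := Option.isSome_iff_exists.mp ((PySem.List.index?_isSome_iff t "").mpr hm)
    rw [PySem.List.index?_eq_idxOf?] at hk
    simp [hk]
  · have hm' : "" ∉ h :: t := by
      simp [List.mem_cons, hne.symm, hm]
    rw [if_neg hm', if_neg hm]
    simp

theorem load_grid_loop_eq (xs : List String) : ∀ grid,
    load_grid_loop grid xs = grid ++ xs.take (pvIdx xs) := by
  induction xs with
  | nil => intro grid; simp [load_grid_loop]
  | cons h t ih =>
    intro grid
    by_cases hb : h = ""
    · subst hb
      have : pvIdx ("" :: t) = 0 := by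
        unfold pvIdx
        rw [if_pos (List.mem_cons_self), PySem.List.index?_cons_self]
        rfl
      simp [load_grid_loop, this]
    · rw [pvIdx_cons_ne h t hb]
      simp [load_grid_loop, hb, ih]

-- ===== VERDICT (by name: the statement is the Claim_ definition above) =====
theorem load_grid_spec : Claim_equal_load_grid := by
  intro xs _
  unfold Spec_load_grid load_grid load_grid_alt
  by_cases hx : xs = []
  · simp [hx]
  · rw [if_neg (by simpa using hx), if_neg hx]
    rw [load_grid_loop_eq xs []]
    simp [pvIdx]
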